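-- pv_equiv track=rewrite | github.com/david-legend/python-algorithms | src/patterns/15_dynamic_programming/3_fibonacci_numbers/minimum_jumps_with_fee/min_jumps_top_with_fee_down_solution.py | find_min_recursive
-- ===== SOURCE A (Python) =====
-- def find_min_recursive(fee, arr_len, step):
--     if step == arr_len - 1:
--         return fee[step]
--
--     if step >= arr_len:
--         return 0
--
--     curr_fee = fee[step]
--     take_step_1 = curr_fee + find_min_recursive(fee, arr_len, step+1)
--     take_step_2 = curr_fee + find_min_recursive(fee, arr_len, step+2)
--     take_step_3 = curr_fee + find_min_recursive(fee, arr_len, step+3)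
--
--     return min(take_step_1, take_step_2, take_step_3)
-- ===== SOURCE B (Python) =====
-- def find_min_recursive(fee, arr_len, step):
--     if step >= arr_len:
--         return 0
--     # bottom-up over the same recurrence, carrying only the last three values
--     a = b = c = 0  # minimal fee from i+1, i+2, i+3 (0 past the end)
--     i = arr_len - 1
--     while i >= step:
--         a, b, c = fee[i] + min(a, b, c), a, b
--         i -= 1
--     return a
-- ===== Notes on version B (the rewrite author's own statement) =====
-- stated objective: alternative
-- what changed: replaces the triple-branching top-down recursion by a bottom-up sweep from the end that keeps only the last three subproblem values, evaluating each index once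
import Mathlib
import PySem

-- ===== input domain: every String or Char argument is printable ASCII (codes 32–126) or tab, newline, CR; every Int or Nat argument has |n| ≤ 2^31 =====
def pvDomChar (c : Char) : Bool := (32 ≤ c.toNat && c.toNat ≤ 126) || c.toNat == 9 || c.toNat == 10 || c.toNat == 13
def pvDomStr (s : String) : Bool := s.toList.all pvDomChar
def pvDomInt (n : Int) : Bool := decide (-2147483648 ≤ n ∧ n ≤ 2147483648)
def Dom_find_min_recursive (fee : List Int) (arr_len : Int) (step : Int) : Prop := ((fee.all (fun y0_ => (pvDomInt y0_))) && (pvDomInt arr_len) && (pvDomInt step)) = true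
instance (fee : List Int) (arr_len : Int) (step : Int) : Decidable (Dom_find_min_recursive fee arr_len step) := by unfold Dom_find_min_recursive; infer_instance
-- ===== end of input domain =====

-- B replaces A's triple-branching top-down recursion by a bottom-up sweep keeping only
-- the last three subproblem values, evaluating each index once (objective: alternative).


-- ===== PORT A =====
-- fee[step] is ported as (pyGet? …).getD 0; Pre_ guarantees the index is in range, so the
-- default is never used on admitted inputs.
def find_min_recursive (fee : List Int) (arr_len : Int) (step : Int) : Int :=
  if step = arr_len - 1 then (PySem.List.pyGet? fee step).getD 0
  else if arr_len ≤ step then 0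
  else
    let curr_fee := (PySem.List.pyGet? fee step).getD 0
    let take_step_1 := curr_fee + find_min_recursive fee arr_len (step + 1)
    let take_step_2 := curr_fee + find_min_recursive fee arr_len (step + 2)
    let take_step_3 := curr_fee + find_min_recursive fee arr_len (step + 3)
    min (min take_step_1 take_step_2) take_step_3
termination_by (arr_len - step).toNat
decreasing_by all_goals omega

-- ===== PORT B =====
-- the 'while i >= step' loop of Source B, state (a, b, c)
def fmrAltLoop (fee : List Int) (step : Int) (i : Int) (a b c : Int) : Int :=
  if step ≤ i then
    fmrAltLoop fee step (i - 1) ((PySem.List.pyGet? fee i).getD 0 + min (min a b) c) a b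
  else a
termination_by (i - step + 1).toNat
decreasing_by omega

def find_min_recursive_alt (fee : List Int) (arr_len : Int) (step : Int) : Int :=
  if arr_len ≤ step then 0
  else fmrAltLoop fee step (arr_len - 1) 0 0 0

-- ===== PRECONDITION & SPEC =====
-- Pre_ = exactly the inputs where Python A returns (elsewhere it raises IndexError):
-- either step is already past the end, or step indexes into fee and arr_len ≤ len(fee).
def Pre_find_min_recursive (fee : List Int) (arr_len : Int) (step : Int) : Prop :=
  arr_len ≤ step ∨ (-(fee.length : Int) ≤ step ∧ arr_len ≤ (fee.length : Int))
instance (fee : List Int) (arr_len : Int) (step : Int) : Decidable (Pre_find_min_recursive fee arr_len step) := by unfold Pre_find_min_recursive; infer_instance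

def pvWitness_find_min_recursive : List Int × Int × Int := ([1, 2, 5, 2, 1, 2], 6, 0)

def Spec_find_min_recursive (fee : List Int) (arr_len : Int) (step : Int) (out : Int) : Prop := out = find_min_recursive_alt fee arr_len step
instance (fee : List Int) (arr_len : Int) (step : Int) (out : Int) : Decidable (Spec_find_min_recursive fee arr_len step out) := by unfold Spec_find_min_recursive; infer_instance

-- ===== CLAIM (what is proved, stated in full; the proofs are below) =====
def Claim_equal_find_min_recursive : Prop := ∀ (fee : List Int) (arr_len : Int) (step : Int), Dom_find_min_recursive fee arr_len step → Pre_find_min_recursive fee arr_len step → Spec_find_min_recursive fee arr_len step (find_min_recursive fee arr_len step)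

-- ===== LEMMAS AND PROOFS =====

theorem fmr_ge (fee : List Int) (arr_len j : Int) (h : arr_len ≤ j) :
    find_min_recursive fee arr_len j = 0 := by
  rw [find_min_recursive]
  rw [if_neg (by omega), if_pos h]

theorem fmr_unfold (fee : List Int) (arr_len i : Int) (h : i ≤ arr_len - 1) :
    find_min_recursive fee arr_len i =
      (PySem.List.pyGet? fee i).getD 0 +
        min (min (find_min_recursive fee arr_len (i + 1)) (find_min_recursive fee arr_len (i + 2)))
          (find_min_recursive fee arr_len (i + 3)) := by
  rcases eq_or_lt_of_le h with heq | hlt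
  · rw [find_min_recursive, if_pos heq,
      fmr_ge fee arr_len (i + 1) (by omega), fmr_ge fee arr_len (i + 2) (by omega),
      fmr_ge fee arr_len (i + 3) (by omega)]
    simp
  · rw [find_min_recursive, if_neg (by omega), if_neg (by omega)]
    dsimp only
    omega

theorem fmr_loop_inv (fee : List Int) (arr_len step : Int) :
    ∀ (n : Nat) (i : Int), i - step = n → i ≤ arr_len - 1 →
      fmrAltLoop fee step i (find_min_recursive fee arr_len (i + 1))
          (find_min_recursive fee arr_len (i + 2)) (find_min_recursive fee arr_len (i + 3)) =
        find_min_recursive fee arr_len step := by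
  intro n
  induction n with
  | zero =>
    intro i hi hle
    have hstep : i = step := by omega
    rw [fmrAltLoop, if_pos (by omega), ← fmr_unfold fee arr_len i hle,
      fmrAltLoop, if_neg (by omega), hstep]
  | succ m ih =>
    intro i hi hle
    rw [fmrAltLoop, if_pos (by omega), ← fmr_unfold fee arr_len i hle]
    have h := ih (i - 1) (by omega) (by omega)
    rw [show i - 1 + 1 = i from by omega, show i - 1 + 2 = i + 1 from by omega,
      show i - 1 + 3 = i + 2 from by omega] at h
    exact h

theorem fmr_eq (fee : List Int) (arr_len step : Int) :
    find_min_recursive fee arr_len step = find_min_recursive_alt fee arr_len step := by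
  unfold find_min_recursive_alt
  by_cases h : arr_len ≤ step
  · rw [if_pos h, fmr_ge fee arr_len step h]
  · rw [if_neg h]
    have h0 : find_min_recursive fee arr_len (arr_len - 1 + 1) = 0 := fmr_ge _ _ _ (by omega)
    have h1 : find_min_recursive fee arr_len (arr_len - 1 + 2) = 0 := fmr_ge _ _ _ (by omega)
    have h2 : find_min_recursive fee arr_len (arr_len - 1 + 3) = 0 := fmr_ge _ _ _ (by omega)
    have := fmr_loop_inv fee arr_len step ((arr_len - 1 - step).toNat) (arr_len - 1)
      (by omega) (by omega)
    rw [h0, h1, h2] at this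
    exact this.symm

-- ===== VERDICT (by name: the statement is the Claim_ definition above) =====
theorem find_min_recursive_spec : Claim_equal_find_min_recursive := by
  intro fee arr_len step _ _
  exact fmr_eq fee arr_len step
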